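-- pv_equiv track=rewrite | github.com/alka4747/ISOA-Event-Manager-Helper | lapcombat.py | buildCluster
-- ===== SOURCE A (Python) =====
-- def buildCluster(cluster, competitorList, early):
--     updatedCluster = list()
--     isRelevantPunch = list()
--     for item in cluster:
--         isRelevantPunch.append(True)
--     if early:
--         for comp in competitorList:
--             for punch in cluster:
--                 if punch[2] == comp:
--                     updatedCluster.append(punch)
--     else:
--         for punch in cluster:
--             for comp in competitorList:
--                 if punch[2] == comp:
--                     isRelevantPunch[cluster.index(punch)] = False
--                 # updatedCluster.append(punch)
--         for punch in cluster:
--             if isRelevantPunch[cluster.index(punch)]: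
--                 updatedCluster.append(punch)
--     return updatedCluster
-- ===== SOURCE B (Python) =====
-- def buildCluster(cluster, competitorList, early):
--     if early:
--         groups = {}
--         for punch in cluster:
--             groups.setdefault(punch[2], []).append(punch)
--         out = []
--         for comp in competitorList:
--             out.extend(groups.get(comp, []))
--         return out
--     else:
--         comps = set(competitorList)
--         return [punch for punch in cluster if punch[2] not in comps]
-- ===== Notes on version B (the rewrite author's own statement) =====
-- stated objective: faster
-- what changed: Replaced the nested membership scans (and the quadratic cluster.index calls) by a one-pass dict grouping punches by punch[2] for the early branch and a set-membership filter for the else branch.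
import Mathlib
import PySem

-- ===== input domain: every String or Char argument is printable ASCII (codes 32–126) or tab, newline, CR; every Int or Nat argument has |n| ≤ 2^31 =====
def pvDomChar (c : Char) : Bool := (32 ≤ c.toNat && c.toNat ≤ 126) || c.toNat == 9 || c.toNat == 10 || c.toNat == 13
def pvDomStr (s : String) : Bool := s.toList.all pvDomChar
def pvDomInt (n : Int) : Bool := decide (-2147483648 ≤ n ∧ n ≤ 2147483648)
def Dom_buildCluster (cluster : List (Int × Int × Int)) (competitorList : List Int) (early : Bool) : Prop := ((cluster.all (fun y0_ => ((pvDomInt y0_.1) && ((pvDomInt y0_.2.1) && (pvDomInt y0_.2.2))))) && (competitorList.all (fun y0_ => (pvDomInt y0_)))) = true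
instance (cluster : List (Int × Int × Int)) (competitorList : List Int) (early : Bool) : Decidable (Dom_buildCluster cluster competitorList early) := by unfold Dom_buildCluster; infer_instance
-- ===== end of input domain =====

-- B replaces A's nested scans (and its quadratic cluster.index calls) by a one-pass dict grouping (early) / set-membership filter (else); return value proved equal.

-- ===== PORT A =====
-- literal transliteration of A.  'isRelevantPunch[cluster.index(punch)]' reads an index that is
-- always in range (index? of a list member is some i with i < length), so List.set / List.getD are exact here.
def buildCluster (cluster : List (Int × Int × Int)) (competitorList : List Int) (early : Bool) : List (Int × Int × Int) :=
  let isRelevantPunch := cluster.map (fun _ => true)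
  if early then
    competitorList.foldl (fun acc comp =>
      cluster.foldl (fun acc punch =>
        if punch.2.2 == comp then acc ++ [punch] else acc) acc) []
  else
    let rel := cluster.foldl (fun rel punch =>
      competitorList.foldl (fun rel comp =>
        if punch.2.2 == comp then
          match PySem.List.index? cluster punch with
          | some i => rel.set i false
          | none => rel
        else rel) rel) isRelevantPunch
    cluster.foldl (fun acc punch =>
      if (match PySem.List.index? cluster punch with
          | some i => rel.getD i false
          | none => false) then acc ++ [punch] else acc) []

-- ===== PORT B =====
def buildCluster_alt (cluster : List (Int × Int × Int)) (competitorList : List Int) (early : Bool) : List (Int × Int × Int) :=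
  if early then
    let groups : PySem.Dict Int (List (Int × Int × Int)) :=
      cluster.foldl (fun d punch => d.modify punch.2.2 [] (· ++ [punch])) PySem.Dict.empty
    competitorList.foldl (fun out comp => out ++ groups.getD comp []) []
  else
    let comps : PySem.Set Int := PySem.Set.ofList competitorList
    cluster.filter (fun punch => !(comps.contains punch.2.2))

-- ===== PRECONDITION & SPEC =====
def Spec_buildCluster (cluster : List (Int × Int × Int)) (competitorList : List Int) (early : Bool) (out : List (Int × Int × Int)) : Prop := out = buildCluster_alt cluster competitorList early
instance (cluster : List (Int × Int × Int)) (competitorList : List Int) (early : Bool) (out : List (Int × Int × Int)) : Decidable (Spec_buildCluster cluster competitorList early out) := by unfold Spec_buildCluster; infer_instance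

-- ===== CLAIM (what is proved, stated in full; the proofs are below) =====
def Claim_equal_buildCluster : Prop := ∀ (cluster : List (Int × Int × Int)) (competitorList : List Int) (early : Bool), Dom_buildCluster cluster competitorList early → Spec_buildCluster cluster competitorList early (buildCluster cluster competitorList early)

-- ===== LEMMAS AND PROOFS =====

-- a membership scan applying an idempotent action collapses to a single 'if ∈'
theorem foldl_if_eq_action {α : Type} [DecidableEq α] (x : α) (a : List Bool → List Bool)
    (ha : ∀ r, a (a r) = a r) :
    ∀ (comps : List α) (rel : List Bool),
      comps.foldl (fun rel comp => if x == comp then a rel else rel) rel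
        = if x ∈ comps then a rel else rel := by
  intro comps
  induction comps with
  | nil => intro rel; simp
  | cons c cs ih =>
    intro rel
    by_cases hx : x = c
    · subst hx
      simp only [List.foldl_cons, beq_self_eq_true, if_true, ih, List.mem_cons, true_or, if_true]
      by_cases h : x ∈ cs <;> simp [h, ha]
    · rw [List.foldl_cons, if_neg (by simp [hx]), ih]
      simp [List.mem_cons, hx]

-- what A's marking loop leaves at position j
theorem mark_fold_getD (cluster : List (Int × Int × Int)) (comps : List Int) :
    ∀ (l : List (Int × Int × Int)) (rel : List Bool) (j : Nat),
      (l.foldl (fun rel p => if p.2.2 ∈ comps then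
          (match PySem.List.index? cluster p with
           | some i => rel.set i false
           | none => rel) else rel) rel).getD j false
        = if ∃ p ∈ l, PySem.List.index? cluster p = some j ∧ p.2.2 ∈ comps then false
          else rel.getD j false := by
  intro l
  induction l with
  | nil => intro rel j; simp
  | cons p l ih =>
    intro rel j
    simp only [List.foldl_cons, ih]
    by_cases hl : ∃ q ∈ l, PySem.List.index? cluster q = some j ∧ q.2.2 ∈ comps
    · rw [if_pos hl, if_pos (by obtain ⟨q, hq, h⟩ := hl; exact ⟨q, List.mem_cons_of_mem _ hq, h⟩)]
    · rw [if_neg hl]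
      by_cases hp : PySem.List.index? cluster p = some j ∧ p.2.2 ∈ comps
      · rw [if_pos (⟨p, List.mem_cons_self, hp⟩ :
          ∃ q ∈ p :: l, PySem.List.index? cluster q = some j ∧ q.2.2 ∈ comps)]
        rw [if_pos hp.2, hp.1]
        simp only [List.getD_eq_getElem?_getD, List.getElem?_set]
        split_ifs <;> simp
      · have hnot : ¬ ∃ q ∈ p :: l, PySem.List.index? cluster q = some j ∧ q.2.2 ∈ comps := by
          rintro ⟨q, hq, h⟩
          rcases List.mem_cons.mp hq with rfl | hq'
          · exact hp h
          · exact hl ⟨q, hq', h⟩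
        rw [if_neg hnot]
        by_cases hin : p.2.2 ∈ comps
        · have hidx : PySem.List.index? cluster p ≠ some j := fun h => hp ⟨h, hin⟩
          rw [if_pos hin]
          cases hcase : PySem.List.index? cluster p with
          | none => simp
          | some i =>
            have hij : i ≠ j := fun h => hidx (by rw [hcase, h])
            simp [List.getD_eq_getElem?_getD, hij]
        · rw [if_neg hin]

-- groups.getD comp [] is exactly the punches with third component comp, in order
theorem groups_getD (cluster : List (Int × Int × Int)) (c : Int) :
    (cluster.foldl (fun d punch => d.modify punch.2.2 [] (· ++ [punch]))
      (PySem.Dict.empty : PySem.Dict Int (List (Int × Int × Int)))).getD c []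
      = cluster.filter (fun p => p.2.2 == c) := by
  have h : cluster.foldl (fun d punch => d.modify punch.2.2 [] (· ++ [punch]))
      (PySem.Dict.empty : PySem.Dict Int (List (Int × Int × Int)))
      = (cluster.map (fun p => (p.2.2, p))).foldl
          (fun d q => d.modify q.1 [] (· ++ [q.2])) PySem.Dict.empty := by
    rw [List.foldl_map]
  rw [h, PySem.Dict.getD_foldl_modify_append, List.filter_map]
  simp [Function.comp_def]

-- the early branches agree
theorem early_eq (cluster : List (Int × Int × Int)) (competitorList : List Int) :
    competitorList.foldl (fun acc comp =>
      cluster.foldl (fun acc punch =>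
        if punch.2.2 == comp then acc ++ [punch] else acc) acc) []
    = competitorList.foldl (fun out comp =>
        out ++ (cluster.foldl (fun d punch => d.modify punch.2.2 [] (· ++ [punch]))
          (PySem.Dict.empty : PySem.Dict Int (List (Int × Int × Int)))).getD comp []) [] := by
  have hA : (fun (acc : List (Int × Int × Int)) (comp : Int) =>
      cluster.foldl (fun acc punch => if punch.2.2 == comp then acc ++ [punch] else acc) acc)
      = fun acc comp => acc ++ cluster.filter (fun p => p.2.2 == comp) := by
    funext acc comp
    exact PySem.List.foldl_append_if_eq_filter _ _ _
  rw [hA]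
  congr 1
  funext out comp
  rw [groups_getD]

-- the read in A's final loop is just non-membership of punch[2]
theorem read_eq (cluster : List (Int × Int × Int)) (competitorList : List Int)
    (punch : Int × Int × Int) (hmem : punch ∈ cluster) :
    (match PySem.List.index? cluster punch with
     | some i => (cluster.foldl (fun rel p => if p.2.2 ∈ competitorList then
          (match PySem.List.index? cluster p with
           | some i => rel.set i false
           | none => rel) else rel) (cluster.map (fun _ => true))).getD i false
     | none => false)
      = !(decide (punch.2.2 ∈ competitorList)) := by
  obtain ⟨j, hj⟩ := Option.isSome_iff_exists.mp ((PySem.List.index?_isSome_iff cluster punch).mpr hmem)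
  rw [hj]
  obtain ⟨hjlt, hjeq, -⟩ := PySem.List.getElem_of_index?_eq_some hj
  dsimp only
  rw [mark_fold_getD]
  by_cases hin : punch.2.2 ∈ competitorList
  · rw [if_pos ⟨punch, hmem, hj, hin⟩]
    simp [hin]
  · have hno : ¬ ∃ p ∈ cluster, PySem.List.index? cluster p = some j ∧ p.2.2 ∈ competitorList := by
      rintro ⟨p, -, hpj, hpin⟩
      obtain ⟨hplt, hpeq, -⟩ := PySem.List.getElem_of_index?_eq_some hpj
      have hpq : p = punch := hpeq.symm.trans hjeq
      exact hin (hpq ▸ hpin)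
    rw [if_neg hno]
    simp [List.getD_eq_getElem?_getD, hjlt, hin]

-- ===== VERDICT (by name: the statement is the Claim_ definition above) =====
theorem buildCluster_spec : Claim_equal_buildCluster := by
  intro cluster competitorList early _
  unfold Spec_buildCluster buildCluster buildCluster_alt
  cases early
  · -- else branch
    simp only [Bool.false_eq_true, if_false]
    have hinner : (fun (rel : List Bool) (punch : Int × Int × Int) =>
        competitorList.foldl (fun rel comp =>
          if punch.2.2 == comp then
            match PySem.List.index? cluster punch with
            | some i => rel.set i false
            | none => rel
          else rel) rel)
        = fun rel punch => if punch.2.2 ∈ competitorList then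
            (match PySem.List.index? cluster punch with
             | some i => rel.set i false
             | none => rel) else rel := by
      funext rel punch
      exact foldl_if_eq_action punch.2.2
        (fun r => match PySem.List.index? cluster punch with
                  | some i => r.set i false
                  | none => r)
        (by intro r; cases PySem.List.index? cluster punch <;> simp [List.set_set])
        competitorList rel
    rw [hinner]
    have hcongr := PySem.List.foldl_congr_mem cluster
      (fun (acc : List (Int × Int × Int)) punch =>
        if (match PySem.List.index? cluster punch with
            | some i => (cluster.foldl (fun rel p => if p.2.2 ∈ competitorList then
                (match PySem.List.index? cluster p with
                 | some i => rel.set i false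
                 | none => rel) else rel)
                (cluster.map fun _ => true)).getD i false
            | none => false) = true then acc ++ [punch] else acc)
      (fun acc punch => if !(decide (punch.2.2 ∈ competitorList)) then acc ++ [punch] else acc)
      []
      (by intro acc punch hpm
          dsimp only
          rw [read_eq cluster competitorList punch hpm])
    rw [hcongr, PySem.List.foldl_append_if_eq_filter]
    simp only [List.nil_append]
    apply List.filter_congr
    intro punch _
    simp [PySem.Set.contains, PySem.Set.mem_ofList]
  · -- early branch
    simp only [if_true]
    exact early_eq cluster competitorList
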